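-- pv_equiv track=rewrite | github.com/axd8911/Leetcode | BB_prep/oneDCandyCrush.py | oneD
-- ===== SOURCE A (Python) =====
-- def oneD(letters):
--     stack = []
--     for i in range(len(letters)):
--         stack.append(letters[i])
--         if i<len(letters)-1 and letters[i]!=letters[i+1]:
--             n = len(stack)-1
--             while n>0:
--                 if stack[n] != stack[n-1]:
--                     break
--                 else:n -= 1
--             if len(stack)-1 - n >=2:
--                 del stack[n:]
--     return ''.join(stack)
-- ===== SOURCE B (Python) =====
-- def oneD(letters):
--     # Run-length-encoded stack: (char, count) pairs instead of raw chars,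
--     # so finding/removing the top run needs no backward rescan or slice delete.
--     groups = []
--     n = len(letters)
--     for i, c in enumerate(letters):
--         if groups and groups[-1][0] == c:
--             groups[-1][1] += 1
--         else:
--             groups.append([c, 1])
--         if i < n - 1 and letters[i + 1] != c and groups[-1][1] >= 3:
--             groups.pop()
--     return ''.join(ch * k for ch, k in groups)
-- ===== Notes on version B (the rewrite author's own statement) =====
-- stated objective: alternative
-- what changed: Replaces A's raw character stack, whose top run is found by a backward index scan and removed by slice deletion, with a run-length-encoded stack of (char, count) pairs where the top run's length is read and popped in O(1).
import Mathlib
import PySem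

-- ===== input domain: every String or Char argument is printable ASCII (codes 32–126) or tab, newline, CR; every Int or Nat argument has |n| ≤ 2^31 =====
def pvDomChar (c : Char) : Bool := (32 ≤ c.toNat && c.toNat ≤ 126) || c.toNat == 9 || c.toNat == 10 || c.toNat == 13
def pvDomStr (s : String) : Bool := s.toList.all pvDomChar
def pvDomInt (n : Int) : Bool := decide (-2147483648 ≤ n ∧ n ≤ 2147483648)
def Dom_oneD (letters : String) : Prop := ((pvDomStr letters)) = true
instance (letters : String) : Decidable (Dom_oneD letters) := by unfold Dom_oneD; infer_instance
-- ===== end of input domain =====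

-- B replaces A's raw character stack (with its backward rescan of the top run and
-- slice deletion) by a run-length-encoded stack of (char, count) pairs; same return value.

-- ===== PORT A =====
-- the inner `while n > 0: if stack[n] != stack[n-1]: break else: n -= 1`
-- (all indices A uses are in range, so getD's default ' ' is never read)
def oneDwhile (stack : List Char) : Nat → Nat
  | 0 => 0
  | n + 1 => if stack.getD (n + 1) ' ' ≠ stack.getD n ' ' then n + 1 else oneDwhile stack n

-- the body guarded by `if i < len(letters)-1 and letters[i] != letters[i+1]`:
-- compute n, then `del stack[n:]` (= take n) when the top run has length ≥ 3
def oneDcollapse (stack1 : List Char) : List Char :=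
  let n := oneDwhile stack1 (stack1.length - 1)
  if stack1.length - 1 - n ≥ 2 then stack1.take n else stack1

-- the `for i in range(len(letters))` loop
def oneD_loop (ls : List Char) (stack : List Char) (i : Nat) : List Char :=
  if _h : i < ls.length then
    oneD_loop ls
      (if i < ls.length - 1 ∧ ls.getD i ' ' ≠ ls.getD (i + 1) ' ' then
        oneDcollapse (stack ++ [ls.getD i ' '])
      else stack ++ [ls.getD i ' ']) (i + 1)
  else stack
  termination_by ls.length - i

def oneD (letters : String) : String := String.mk (oneD_loop letters.toList [] 0)

-- ===== PORT B =====
-- push one char onto the RLE stack (top of stack = head of list)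
def pushChar (groups : List (Char × Nat)) (c : Char) : List (Char × Nat) :=
  match groups with
  | (c', k) :: rest => if c' = c then (c', k + 1) :: rest else (c, 1) :: (c', k) :: rest
  | [] => [(c, 1)]

def topCount (groups : List (Char × Nat)) : Nat :=
  match groups with
  | (_, k) :: _ => k
  | [] => 0

def oneD_alt_go (ls : List Char) (groups : List (Char × Nat)) (i : Nat) : List (Char × Nat) :=
  if _h : i < ls.length then
    oneD_alt_go ls
      (if i < ls.length - 1 ∧ ls.getD (i + 1) ' ' ≠ ls.getD i ' ' ∧
          topCount (pushChar groups (ls.getD i ' ')) ≥ 3 then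
        (pushChar groups (ls.getD i ' ')).tail
      else pushChar groups (ls.getD i ' ')) (i + 1)
  else groups
  termination_by ls.length - i

-- ''.join(ch * k for ch, k in groups), groups listed bottom-first
def expandG (groups : List (Char × Nat)) : List Char :=
  (groups.reverse).flatMap (fun p => List.replicate p.2 p.1)

def oneD_alt (letters : String) : String := String.mk (expandG (oneD_alt_go letters.toList [] 0))

-- ===== PRECONDITION & SPEC =====
def Spec_oneD (letters : String) (out : String) : Prop := out = oneD_alt letters
instance (letters : String) (out : String) : Decidable (Spec_oneD letters out) := by unfold Spec_oneD; infer_instance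

-- ===== CLAIM (what is proved, stated in full; the proofs are below) =====
def Claim_equal_oneD : Prop := ∀ (letters : String), Dom_oneD letters → Spec_oneD letters (oneD letters)

-- ===== LEMMAS AND PROOFS =====

-- adjacent groups carry distinct characters
def NoAdj : List (Char × Nat) → Prop
  | (a, _) :: (b, k) :: rest => a ≠ b ∧ NoAdj ((b, k) :: rest)
  | _ => True

-- invariant of B's stack: positive counts, adjacent groups distinct
def GInv (gs : List (Char × Nat)) : Prop :=
  (∀ p ∈ gs, 1 ≤ p.2) ∧ NoAdj gs

lemma noAdj_count (c : Char) (j k : Nat) (rest : List (Char × Nat))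
    (h : NoAdj ((c, j) :: rest)) : NoAdj ((c, k) :: rest) := by
  match rest with
  | [] => trivial
  | (b, k') :: rest' => exact h

lemma noAdj_tail (gs : List (Char × Nat)) (h : NoAdj gs) : NoAdj gs.tail := by
  match gs with
  | [] => trivial
  | [p] => trivial
  | (a, j) :: (b, k) :: rest => exact h.2

lemma expandG_cons (c : Char) (k : Nat) (rest : List (Char × Nat)) :
    expandG ((c, k) :: rest) = expandG rest ++ List.replicate k c := by
  simp [expandG]

lemma expandG_getLast? (c : Char) (k : Nat) (rest : List (Char × Nat)) (hk : 1 ≤ k) :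
    (expandG ((c, k) :: rest)).getLast? = some c := by
  rw [expandG_cons]
  rcases Nat.exists_eq_add_of_le hk with ⟨m, rfl⟩
  have : List.replicate (1 + m) c = List.replicate m c ++ [c] := by
    simp [List.replicate_add, Nat.add_comm]
  rw [this, ← List.append_assoc, List.getLast?_append]
  simp

lemma while_spec (xs : List Char) (c : Char) (k : Nat)
    (hlast : xs.getLast? ≠ some c) :
    ∀ m, m < k → oneDwhile (xs ++ List.replicate k c) (xs.length + m) = xs.length := by
  intro m
  induction m with
  | zero =>
    intro hk
    rw [Nat.add_zero]
    rcases eq_or_ne xs ([] : List Char) with rfl | hxne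
    · simp [oneDwhile]
    · have hpos : 0 < xs.length := List.length_pos_of_ne_nil hxne
      obtain ⟨j, hxs⟩ : ∃ j, xs.length = j + 1 := ⟨xs.length - 1, by omega⟩
      have h1 : (xs ++ List.replicate k c).getD (j + 1) ' ' = c := by
        rw [List.getD_eq_getElem?_getD, List.getElem?_append_right (by omega)]
        have e : j + 1 - xs.length = 0 := by omega
        rw [e]
        simp [List.getElem?_replicate, hk]
      have h2 : (xs ++ List.replicate k c).getD j ' ' = xs.getLast hxne := by
        rw [List.getD_eq_getElem?_getD, List.getElem?_append_left (by omega)]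
        rw [List.getElem?_eq_getElem (by omega : j < xs.length)]
        simp [List.getLast_eq_getElem, hxs]
      have h3 : xs.getLast hxne ≠ c := by
        intro h
        apply hlast
        rw [List.getLast?_eq_getLast_of_ne_nil hxne, h]
      rw [hxs, oneDwhile, if_pos (by rw [h1, h2]; exact fun h => h3 h.symm)]
  | succ m ih =>
    intro hk
    have hs : xs.length + (m + 1) = (xs.length + m) + 1 := by omega
    rw [hs, oneDwhile]
    have h1 : (xs ++ List.replicate k c).getD (xs.length + m + 1) ' ' = c := by
      rw [List.getD_eq_getElem?_getD, List.getElem?_append_right (by omega)]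
      have e : xs.length + m + 1 - xs.length = m + 1 := by omega
      rw [e]
      simp [List.getElem?_replicate, hk]
    have h2 : (xs ++ List.replicate k c).getD (xs.length + m) ' ' = c := by
      rw [List.getD_eq_getElem?_getD, List.getElem?_append_right (by omega)]
      rw [Nat.add_sub_cancel_left]
      simp [List.getElem?_replicate, show m < k by omega]
    rw [if_neg (by rw [h1, h2]; simp)]
    exact ih (by omega)

-- pushChar facts
lemma pushChar_shape (gs : List (Char × Nat)) (c : Char) (hGInv : GInv gs) :
    ∃ k rest, pushChar gs c = (c, k) :: rest ∧ 1 ≤ k ∧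
      (expandG rest).getLast? ≠ some c ∧
      expandG (pushChar gs c) = expandG gs ++ [c] ∧
      GInv (pushChar gs c) := by
  obtain ⟨hpos, hchain⟩ := hGInv
  match gs with
  | [] =>
    refine ⟨1, [], by simp [pushChar], by omega, by simp [expandG], by simp [expandG, pushChar], ?_, ?_⟩
    · intro p hp
      simp [pushChar] at hp
      subst hp; simp
    · trivial
  | (c', k) :: rest =>
    by_cases hc : c' = c
    · subst hc
      have hpc : pushChar ((c', k) :: rest) c' = (c', k + 1) :: rest := by simp [pushChar]
      refine ⟨k + 1, rest, hpc, by omega, ?_, ?_, ?_, ?_⟩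
      · match rest with
        | [] => simp [expandG]
        | (c2, k2) :: rest2 =>
          have hk2 : 1 ≤ k2 := hpos (c2, k2) (by simp)
          rw [expandG_getLast? c2 k2 rest2 hk2]
          have : c' ≠ c2 := hchain.1
          simp [Ne.symm this]
      · rw [hpc, expandG_cons, expandG_cons]
        simp [List.replicate_succ', List.append_assoc]
      · rw [hpc]
        intro p hp
        rcases List.mem_cons.mp hp with h | h
        · subst h; simp
        · exact hpos p (by simp [h])
      · rw [hpc]
        exact noAdj_count c' k (k + 1) rest hchain
    · have hpc : pushChar ((c', k) :: rest) c = (c, 1) :: (c', k) :: rest := by simp [pushChar, hc]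
      refine ⟨1, (c', k) :: rest, hpc, le_refl 1, ?_, ?_, ?_, ?_⟩
      · have hk : 1 ≤ k := hpos (c', k) (by simp)
        rw [expandG_getLast? c' k rest hk]
        simp [hc]
      · rw [hpc, expandG_cons]
        simp
      · rw [hpc]
        intro p hp
        rcases List.mem_cons.mp hp with h | h
        · subst h; simp
        · exact hpos p h
      · rw [hpc]
        exact ⟨fun h => hc h.symm, hchain⟩

lemma GInv_tail (gs : List (Char × Nat)) (h : GInv gs) : GInv gs.tail := by
  obtain ⟨hpos, hchain⟩ := h
  exact ⟨fun p hp => hpos p (List.mem_of_mem_tail hp), noAdj_tail gs hchain⟩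

lemma go_eq (ls : List Char) :
    ∀ m i gs, ls.length - i ≤ m → GInv gs →
      oneD_loop ls (expandG gs) i = expandG (oneD_alt_go ls gs i) := by
  intro m
  induction m with
  | zero =>
    intro i gs hm _
    have : ¬ i < ls.length := by omega
    rw [oneD_loop, oneD_alt_go, dif_neg this, dif_neg this]
  | succ m ih =>
    intro i gs hm hGInv
    by_cases hi : i < ls.length
    · rw [oneD_loop, oneD_alt_go, dif_pos hi, dif_pos hi]
      set c := ls.getD i ' ' with hc
      obtain ⟨k, rest, hshape, hk, hlast, hexp, hGInv1⟩ := pushChar_shape gs c hGInv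
      rw [← hexp]
      by_cases hguard : i < ls.length - 1 ∧ c ≠ ls.getD (i + 1) ' '
      · -- boundary: both sides examine the top run
        have hguardB : (i < ls.length - 1 ∧ ls.getD (i + 1) ' ' ≠ c ∧
            topCount (pushChar gs c) ≥ 3) ↔ (i < ls.length - 1 ∧ k ≥ 3) := by
          rw [hshape]
          show (_ ∧ _ ∧ k ≥ 3) ↔ _
          constructor
          · rintro ⟨h1, _, h3⟩; exact ⟨h1, h3⟩
          · rintro ⟨h1, h3⟩; exact ⟨h1, fun he => hguard.2 he.symm, h3⟩
        have hlen : (expandG (pushChar gs c)).length = (expandG rest).length + k := by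
          rw [hshape, expandG_cons]; simp
        have hwhile : oneDwhile (expandG (pushChar gs c)) ((expandG (pushChar gs c)).length - 1)
            = (expandG rest).length := by
          have h1 : (expandG (pushChar gs c)).length - 1 = (expandG rest).length + (k - 1) := by
            omega
          rw [h1, hshape, expandG_cons]
          exact while_spec (expandG rest) c k hlast (k - 1) (by omega)
        rw [if_pos hguard]
        unfold oneDcollapse
        rw [hwhile]
        by_cases hk3 : k ≥ 3
        · rw [if_pos (by omega : (expandG (pushChar gs c)).length - 1 - (expandG rest).length ≥ 2)]
          have htake : (expandG (pushChar gs c)).take (expandG rest).length = expandG rest := by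
            rw [hshape, expandG_cons, List.take_left']
            rfl
          rw [htake, if_pos (hguardB.mpr ⟨hguard.1, hk3⟩), hshape]
          have hGInvrest : GInv rest := by
            have := GInv_tail _ hGInv1
            rwa [hshape] at this
          exact ih (i + 1) rest (by omega) hGInvrest
        · rw [if_neg (by omega : ¬ (expandG (pushChar gs c)).length - 1 - (expandG rest).length ≥ 2)]
          rw [if_neg (fun h => hk3 (hguardB.mp h).2)]
          exact ih (i + 1) (pushChar gs c) (by omega) hGInv1
      · -- no boundary check fires
        rw [if_neg hguard]
        rw [if_neg (fun h => hguard ⟨h.1, fun he => h.2.1 he.symm⟩)]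
        exact ih (i + 1) (pushChar gs c) (by omega) hGInv1
    · rw [oneD_loop, oneD_alt_go, dif_neg hi, dif_neg hi]

-- ===== VERDICT (by name: the statement is the Claim_ definition above) =====
theorem oneD_spec : Claim_equal_oneD := by
  intro letters _
  show oneD letters = oneD_alt letters
  unfold oneD oneD_alt
  have h := go_eq letters.toList letters.toList.length 0 []
    (by omega) ⟨by simp, trivial⟩
  rw [show expandG [] = [] from rfl] at h
  rw [h]
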